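-- pv_equiv track=rewrite | github.com/tedchengf/ECL_Experiment2 | stimuli.py | subset_dicts_geq
-- ===== SOURCE A (Python) =====
-- def subset_dicts_geq(A, B):
-- 	if len(A) == 0: return True
-- 	for k_a in A:
-- 		v_a = A[k_a]
-- 		if k_a in B:
-- 			v_b = B[k_a]
-- 			if v_b < v_a: return False
-- 		else:
-- 			return False
-- 	return True
-- ===== SOURCE B (Python) =====
-- def subset_dicts_geq(A, B):
-- 	# Sort both key sets and walk them with a two-pointer merge:
-- 	# advance through B's sorted keys looking for each of A's sorted keys in order,
-- 	# comparing values on a match.  Correct because sorted orders align matching keys.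
-- 	ka = sorted(A)
-- 	kb = sorted(B)
-- 	i = j = 0
-- 	while i < len(ka):
-- 		if j == len(kb):
-- 			return False
-- 		a, b = ka[i], kb[j]
-- 		if b < a:
-- 			j += 1
-- 		elif b == a:
-- 			if B[b] < A[a]:
-- 				return False
-- 			i += 1
-- 			j += 1
-- 		else:
-- 			return False
-- 	return True
-- ===== Notes on version B (the rewrite author's own statement) =====
-- stated objective: alternative
-- what changed: Replaced the per-key hash-lookup loop by a sort-then-merge: both key sets are sorted and walked with a two-pointer scan that matches A's keys against B's in order, comparing values on each match.
import Mathlib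
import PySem

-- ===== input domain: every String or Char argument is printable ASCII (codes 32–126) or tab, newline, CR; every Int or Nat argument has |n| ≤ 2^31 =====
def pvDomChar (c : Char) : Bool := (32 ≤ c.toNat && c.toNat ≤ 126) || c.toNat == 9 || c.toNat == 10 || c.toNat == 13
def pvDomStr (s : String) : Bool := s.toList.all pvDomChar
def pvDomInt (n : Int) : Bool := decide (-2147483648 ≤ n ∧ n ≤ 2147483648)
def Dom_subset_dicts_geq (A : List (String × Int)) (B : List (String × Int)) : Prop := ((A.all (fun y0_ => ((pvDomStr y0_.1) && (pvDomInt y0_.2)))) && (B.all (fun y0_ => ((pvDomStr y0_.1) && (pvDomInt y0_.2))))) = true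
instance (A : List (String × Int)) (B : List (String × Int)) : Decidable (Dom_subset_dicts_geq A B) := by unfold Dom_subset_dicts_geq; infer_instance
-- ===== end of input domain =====

-- B replaces A's per-key hash-lookup loop by a sort-then-merge two-pointer scan over both sorted key lists (objective: alternative).


-- ===== PORT A =====
-- the 'for k_a in A' loop, with A's early returns
def goA (dA dB : PySem.Dict String Int) : List String → Bool
  | [] => true
  | k :: ks =>
    match dA.get? k with          -- v_a = A[k_a]; k_a comes from A's keys, so this is always `some`
    | some va =>
      if dB.contains k then       -- if k_a in B
        match dB.get? k with      -- v_b = B[k_a]; guarded by the contains test, always `some`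
        | some vb => if vb < va then false else goA dA dB ks
        | none => false
      else false
    | none => false

def subset_dicts_geq (A : List (String × Int)) (B : List (String × Int)) : Bool :=
  let dA := PySem.Dict.ofList A
  let dB := PySem.Dict.ofList B
  if dA.size == 0 then true
  else goA dA dB dA.keys

-- ===== PORT B =====
-- the two-pointer 'while i < len(ka)' merge; consuming the heads of ka/kb is advancing i/j
def goB (dA dB : PySem.Dict String Int) : List String → List String → Bool
  | [], _ => true                              -- i reached len(ka)
  | _ :: _, [] => false                        -- j == len(kb)
  | a :: as, b :: bs =>
    if b < a then goB dA dB (a :: as) bs       -- j += 1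
    else if b == a then
      match dB.get? b, dA.get? a with          -- B[b], A[a]
      | some vb, some va => if vb < va then false else goB dA dB as bs   -- i += 1; j += 1
      | _, _ => false
    else false
termination_by ka kb => ka.length + kb.length

def subset_dicts_geq_alt (A : List (String × Int)) (B : List (String × Int)) : Bool :=
  let dA := PySem.Dict.ofList A
  let dB := PySem.Dict.ofList B
  let ka := PySem.List.sorted dA.keys (fun x => x) false   -- ka = sorted(A)
  let kb := PySem.List.sorted dB.keys (fun x => x) false   -- kb = sorted(B)
  goB dA dB ka kb

-- ===== PRECONDITION & SPEC =====
def Spec_subset_dicts_geq (A : List (String × Int)) (B : List (String × Int)) (out : Bool) : Prop := out = subset_dicts_geq_alt A B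
instance (A : List (String × Int)) (B : List (String × Int)) (out : Bool) : Decidable (Spec_subset_dicts_geq A B out) := by unfold Spec_subset_dicts_geq; infer_instance

-- ===== CLAIM (what is proved, stated in full; the proofs are below) =====
def Claim_equal_subset_dicts_geq : Prop := ∀ (A : List (String × Int)) (B : List (String × Int)), Dom_subset_dicts_geq A B → Spec_subset_dicts_geq A B (subset_dicts_geq A B)

-- ===== LEMMAS AND PROOFS =====

-- the order-free characterisation both loops are reduced to
def chk (dA dB : PySem.Dict String Int) (kb : List String) (k : String) : Bool :=
  decide (k ∈ kb) &&
    (match dB.get? k, dA.get? k with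
     | some vb, some va => decide (va ≤ vb)
     | _, _ => false)

theorem all_congr_mem {α : Type} (l : List α) (f g : α → Bool)
    (h : ∀ x ∈ l, f x = g x) : l.all f = l.all g := by
  induction l with
  | nil => rfl
  | cons x xs ih =>
    simp only [List.all_cons, h x (List.mem_cons_self ..),
      ih (fun y hy => h y (List.mem_cons_of_mem _ hy))]

-- A's loop over any key list equals the pointwise check
theorem goA_eq_all (dA dB : PySem.Dict String Int) (ks : List String) :
    goA dA dB ks = ks.all (chk dA dB dB.keys) := by
  induction ks with
  | nil => rfl
  | cons k ks ih =>
    simp only [goA, List.all_cons]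
    cases hA : dA.get? k with
    | none => simp [chk, hA]
    | some va =>
      by_cases hc : dB.contains k
      · have hm : k ∈ dB.keys := (PySem.Dict.contains_iff_mem_keys ..).mp hc
        cases hB : dB.get? k with
        | none => exact absurd hB ((not_iff_not.mpr (PySem.Dict.get?_eq_none_iff_not_mem_keys ..)).mpr (by simpa using hm))
        | some vb =>
          by_cases hlt : vb < va
          · simp [hc, hlt, chk, hA, hB, hm, not_le.mpr hlt]
          · simp [hc, hlt, chk, hA, hB, hm, not_lt.mp hlt, ih]
      · have hm : k ∉ dB.keys := fun h => by
          simp [(PySem.Dict.contains_iff_mem_keys dB k).mpr h] at hc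
        simp [hc, chk, hm]

-- B's merge over strictly sorted key lists equals the pointwise check
theorem goB_eq_all (dA dB : PySem.Dict String Int) (kb : List String) :
    ∀ ka : List String, ka.Pairwise (· < ·) → kb.Pairwise (· < ·) →
      goB dA dB ka kb = ka.all (chk dA dB kb) := by
  induction kb with
  | nil =>
    intro ka _ _
    cases ka with
    | nil => simp [goB]
    | cons a as => simp [goB, chk]
  | cons b bs ih =>
    intro ka hka hkb
    cases ka with
    | nil => simp [goB]
    | cons a as =>
      have hkb' : bs.Pairwise (· < ·) := hkb.tail
      have hb_lt : ∀ x ∈ bs, b < x := fun x hx => (List.pairwise_cons.mp hkb).1 x hx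
      have ha_lt : ∀ x ∈ as, a < x := fun x hx => (List.pairwise_cons.mp hka).1 x hx
      rcases lt_trichotomy b a with hba | hba | hba
      · -- b < a: no element of a :: as can equal b
        have hne : ∀ x ∈ a :: as, x ≠ b := by
          intro x hx
          have hbx : b < x := by
            rcases List.mem_cons.mp hx with rfl | hx'
            · exact hba
            · exact lt_trans hba (ha_lt x hx')
          exact fun h => lt_irrefl b (h ▸ hbx)
        rw [goB, if_pos hba, ih _ hka hkb']
        refine (all_congr_mem _ _ _ ?_).symm
        intro x hx
        simp [chk, List.mem_cons, hne x hx]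
      · -- b = a: match
        subst hba
        have hne : ∀ x ∈ as, x ≠ b := by
          intro x hx
          exact fun h => lt_irrefl b (h ▸ ha_lt x hx)
        rw [goB, if_neg (lt_irrefl b), if_pos (by simp)]
        cases hB : dB.get? b with
        | none => simp [chk, hB]
        | some vb =>
          cases hA : dA.get? b with
          | none => simp [chk, hB, hA]
          | some va =>
            show (if vb < va then false else goB dA dB as bs) = _
            by_cases hlt : vb < va
            · simp [hlt, chk, hB, hA, List.all_cons, not_le.mpr hlt]
            · rw [if_neg hlt, ih as hka.tail hkb']
              simp only [List.all_cons, chk, hB, hA]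
              rw [all_congr_mem as (chk dA dB bs) (chk dA dB (b :: bs))
                (by intro x hx; simp [chk, List.mem_cons, hne x hx])]
              simp [not_lt.mp hlt]
      · -- a < b: a not in b :: bs, loop returns False
        have hnot : a ∉ b :: bs := by
          intro h
          rcases List.mem_cons.mp h with rfl | h'
          · exact lt_irrefl _ hba
          · exact lt_irrefl _ (lt_trans hba (hb_lt a h'))
        rw [goB, if_neg (not_lt.mpr (le_of_lt hba)),
          if_neg (by simp; exact ne_of_gt hba)]
        simp [List.all_cons, chk, hnot]

theorem pairwise_lt_sorted_keys (d : PySem.Dict String Int) (h : d.keys.Nodup) :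
    (PySem.List.sorted d.keys (fun x => x) false).Pairwise (· < ·) := by
  have hperm := PySem.List.sorted_perm d.keys (fun x : String => x) false
  have hnd : (PySem.List.sorted d.keys (fun x => x) false).Nodup :=
    hperm.nodup_iff.mpr h
  have hle : (PySem.List.sorted d.keys (fun x => x) false).Pairwise (· ≤ ·) :=
    PySem.List.sorted_pairwise d.keys (fun x => x)
  exact (hle.and hnd).imp (fun h => lt_of_le_of_ne h.1 h.2)

theorem subset_dicts_geq_eq (A B : List (String × Int)) :
    subset_dicts_geq A B = subset_dicts_geq_alt A B := by
  unfold subset_dicts_geq subset_dicts_geq_alt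
  simp only []
  set dA := PySem.Dict.ofList A with hdA
  set dB := PySem.Dict.ofList B with hdB
  have hpa := pairwise_lt_sorted_keys dA (hdA ▸ PySem.Dict.nodup_keys_ofList A)
  have hpb := pairwise_lt_sorted_keys dB (hdB ▸ PySem.Dict.nodup_keys_ofList B)
  rw [goB_eq_all dA dB _ _ hpa hpb]
  have hmemb : ∀ x, (x ∈ PySem.List.sorted dB.keys (fun x => x) false) ↔ x ∈ dB.keys :=
    fun x => PySem.List.mem_sorted ..
  have hcongr : ∀ x ∈ PySem.List.sorted dA.keys (fun x => x) false,
      chk dA dB (PySem.List.sorted dB.keys (fun x => x) false) x = chk dA dB dB.keys x := by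
    intro x _; simp [chk, hmemb x]
  rw [all_congr_mem _ _ _ hcongr]
  have hperm : (PySem.List.sorted dA.keys (fun x => x) false).Perm dA.keys :=
    PySem.List.sorted_perm ..
  have hall : (PySem.List.sorted dA.keys (fun x => x) false).all (chk dA dB dB.keys)
      = dA.keys.all (chk dA dB dB.keys) := by
    apply Bool.eq_iff_iff.mpr
    simp only [List.all_eq_true]
    exact ⟨fun h x hx => h x (hperm.mem_iff.mpr hx), fun h x hx => h x (hperm.mem_iff.mp hx)⟩
  rw [hall, ← goA_eq_all]
  by_cases hz : dA.size == 0
  · have hk : dA.keys = [] := by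
      have : dA.keys.length = 0 := by
        simpa [PySem.Dict.keys, PySem.Dict.size] using (by simpa using hz : dA.size = 0)
      exact List.eq_nil_of_length_eq_zero this
    simp [hz, hk, goA]
  · simp [hz]

-- ===== VERDICT (by name: the statement is the Claim_ definition above) =====
theorem subset_dicts_geq_spec : Claim_equal_subset_dicts_geq := by
  intro A B _
  exact subset_dicts_geq_eq A B
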